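-- pv_equiv track=rewrite | github.com/moseslua/mhermes | hmaom/integrations/miroalligator.py | _slice_project
-- ===== SOURCE A (Python) =====
-- def _slice_project(description: str) -> list[dict[str, str]]:
--     """Naive project slicer – looks for ``MODULE:`` markers in the description.
--
--     Falls back to a single slice when no markers are present.
--     """
--     lines = description.splitlines()
--     slices: list[dict[str, str]] = []
--     current: dict[str, str] | None = None
--
--     for line in lines:
--         stripped = line.strip()
--         if stripped.startswith("MODULE:"):
--             if current:
--                 slices.append(current)
--             current = {
--                 "module": stripped.split(":", 1)[1].strip(),
--                 "description": "",
--                 "content": "",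
--             }
--         elif current is not None:
--             current["description"] += line + "\n"
--             current["content"] += line + "\n"
--
--     if current:
--         slices.append(current)
--
--     if not slices:
--         slices.append(
--             {"module": "default", "description": description, "content": description}
--         )
--     return slices
-- ===== SOURCE B (Python) =====
-- def _slice_project(description: str) -> list[dict[str, str]]:
--     """Reverse-pass slicer: walk the lines back to front, buffering body lines
--     until their MODULE: marker is reached, prepending one finished slice per
--     marker; the body text is joined in one go instead of accumulated by +=."""
--     slices: list[dict[str, str]] = []
--     pending: list[str] = []
--     for line in reversed(description.splitlines()):
--         stripped = line.strip()
--         if stripped.startswith("MODULE:"):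
--             body = "".join(l + "\n" for l in pending)
--             slices.insert(0, {
--                 "module": stripped.split(":", 1)[1].strip(),
--                 "description": body,
--                 "content": body,
--             })
--             pending = []
--         else:
--             pending.insert(0, line)
--     if not slices:
--         return [{"module": "default", "description": description, "content": description}]
--     return slices
-- ===== Notes on version B (the rewrite author's own statement) =====
-- stated objective: alternative
-- what changed: B scans the lines back to front with a pending-body buffer, prepending one finished slice per MODULE: marker and joining each body in a single pass, instead of A's forward state machine that grows the open slice's strings with += on every line.
import Mathlib
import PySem

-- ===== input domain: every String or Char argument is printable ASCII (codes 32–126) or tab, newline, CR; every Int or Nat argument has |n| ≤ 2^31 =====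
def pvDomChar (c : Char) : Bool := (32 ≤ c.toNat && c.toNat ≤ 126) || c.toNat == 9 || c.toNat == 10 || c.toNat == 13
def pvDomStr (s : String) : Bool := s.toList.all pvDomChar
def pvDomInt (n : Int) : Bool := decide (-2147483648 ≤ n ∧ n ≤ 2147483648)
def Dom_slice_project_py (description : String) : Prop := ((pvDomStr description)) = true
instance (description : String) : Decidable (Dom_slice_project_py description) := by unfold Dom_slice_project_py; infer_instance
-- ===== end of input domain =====

-- B walks the lines back to front with a pending-body buffer and joins each body in one
-- go (objective: alternative decomposition; same cost). Equivalence of return values.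

-- ===== PORT A =====
-- the three-key dict {"module": m, "description": "", "content": ""} as an assoc list
def pvNewCurrent (m : String) : List (String × String) :=
  [("module", m), ("description", ""), ("content", "")]

-- current[k] += suffix  (keys are unique, so mapping over the items is d[k] = f(d[k]))
def pvAddTo (d : List (String × String)) (k : String) (suffix : String) : List (String × String) :=
  d.map (fun p => if p.1 = k then (p.1, p.2 ++ suffix) else p)

-- one iteration of A's for-loop over (slices, current)
def pvStepA (st : List (List (String × String)) × Option (List (String × String))) (line : String) :
    List (List (String × String)) × Option (List (String × String)) :=
  let stripped := PySem.Str.strip line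
  if PySem.Str.startswith stripped "MODULE:" then
    let slices := match st.2 with
      | some c => st.1 ++ [c]    -- `if current:` — current, when not None, has three keys, hence truthy
      | none => st.1
    let parts := (PySem.Str.splitMax? stripped ":" 1).getD []   -- sep ":" ≠ "", so the getD default never fires
    (slices, some (pvNewCurrent (PySem.Str.strip ((PySem.List.pyGet? parts 1).getD ""))))  -- parts has ≥ 2 pieces here, so [1] exists
  else
    match st.2 with
    | some c => (st.1, some (pvAddTo (pvAddTo c "description" (line ++ "\n")) "content" (line ++ "\n")))
    | none => st

def slice_project_py (description : String) : List (List (String × String)) :=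
  let lines := PySem.Str.splitlines description
  let st := lines.foldl pvStepA ([], none)
  let slices := match st.2 with
    | some c => st.1 ++ [c]
    | none => st.1
  if slices = [] then
    [[("module", "default"), ("description", description), ("content", description)]]
  else slices

-- ===== PORT B =====
-- one iteration of B's reversed loop (foldr = traversal from the last line backwards)
def pvStepB (line : String) (st : List (List (String × String)) × List String) :
    List (List (String × String)) × List String :=
  let stripped := PySem.Str.strip line
  if PySem.Str.startswith stripped "MODULE:" then
    let body := PySem.Str.join "" (st.2.map (fun l => l ++ "\n"))
    let parts := (PySem.Str.splitMax? stripped ":" 1).getD []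
    ([("module", PySem.Str.strip ((PySem.List.pyGet? parts 1).getD "")),
      ("description", body), ("content", body)] :: st.1, [])
  else
    (st.1, line :: st.2)

def slice_project_py_alt (description : String) : List (List (String × String)) :=
  let st := (PySem.Str.splitlines description).foldr pvStepB ([], [])
  if st.1 = [] then
    [[("module", "default"), ("description", description), ("content", description)]]
  else st.1

-- ===== PRECONDITION & SPEC =====
def Spec_slice_project_py (description : String) (out : List (List (String × String))) : Prop := out = slice_project_py_alt description
instance (description : String) (out : List (List (String × String))) : Decidable (Spec_slice_project_py description out) := by unfold Spec_slice_project_py; infer_instance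

-- ===== CLAIM (what is proved, stated in full; the proofs are below) =====
def Claim_equal_slice_project_py : Prop := ∀ (description : String), Dom_slice_project_py description → Spec_slice_project_py description (slice_project_py description)

-- ===== LEMMAS AND PROOFS =====

-- join with empty separator peels off the head
theorem pvCharsJoin_cons (l : List Char) (rest : List (List Char)) :
    PySem.Chars.join [] (l :: rest) = l ++ PySem.Chars.join [] rest := by
  cases rest <;> simp [PySem.Chars.join, List.intercalate]

theorem pvJoin_nil : PySem.Str.join "" [] = "" := by
  simp [PySem.Str.join, PySem.Chars.join, List.intercalate]

theorem pvJoin_cons (l : String) (rest : List String) :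
    PySem.Str.join "" (l :: rest) = l ++ PySem.Str.join "" rest := by
  simp [PySem.Str.join, pvCharsJoin_cons]

-- the slice A flushes for an open current (module m, accumulated body b)
def pvSlice (m b : String) : List (String × String) :=
  [("module", m), ("description", b), ("content", b)]

theorem pvNewCurrent_eq (m : String) : pvNewCurrent m = pvSlice m "" := rfl

-- A's += on the three-key current dict updates both text fields
theorem pvAddTo_slice (m b s : String) :
    pvAddTo (pvAddTo (pvSlice m b) "description" s) "content" s = pvSlice m (b ++ s) := by
  simp [pvAddTo, pvSlice]

theorem pvMain (lines : List String) :
    (∀ acc m b,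
        (match (lines.foldl pvStepA (acc, some (pvSlice m b))).2 with
          | some c => (lines.foldl pvStepA (acc, some (pvSlice m b))).1 ++ [c]
          | none => (lines.foldl pvStepA (acc, some (pvSlice m b))).1)
        = acc ++ pvSlice m (b ++ PySem.Str.join "" ((lines.foldr pvStepB ([], [])).2.map (fun l => l ++ "\n")))
            :: (lines.foldr pvStepB ([], [])).1) ∧
    (∀ acc,
        (match (lines.foldl pvStepA (acc, none)).2 with
          | some c => (lines.foldl pvStepA (acc, none)).1 ++ [c]
          | none => (lines.foldl pvStepA (acc, none)).1)
        = acc ++ (lines.foldr pvStepB ([], [])).1) := by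
  induction lines with
  | nil =>
    constructor
    · intro acc m b
      simp [pvJoin_nil]
    · intro acc
      simp
  | cons l ls ih =>
    obtain ⟨ih1, ih2⟩ := ih
    by_cases h : PySem.Str.startswith (PySem.Str.strip l) "MODULE:"
    · constructor
      · intro acc m b
        simp only [List.foldl_cons, List.foldr_cons, pvStepA, pvStepB, h, if_pos, pvNewCurrent_eq]
        rw [ih1]
        simp only [List.map_nil, pvJoin_nil, pvSlice, String.append_empty, String.empty_append,
          List.cons_append, List.nil_append, List.append_assoc]
      · intro acc
        simp only [List.foldl_cons, List.foldr_cons, pvStepA, pvStepB, h, if_pos, pvNewCurrent_eq]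
        rw [ih1]
        simp only [pvSlice, String.empty_append]
    · constructor
      · intro acc m b
        simp only [List.foldl_cons, List.foldr_cons, pvStepA, pvStepB, h, Bool.false_eq_true, if_false, pvAddTo_slice]
        rw [ih1]
        simp only [List.map_cons, pvJoin_cons, pvSlice, String.append_assoc]
      · intro acc
        simp only [List.foldl_cons, List.foldr_cons, pvStepA, pvStepB, h, Bool.false_eq_true, if_false]
        exact ih2 acc

-- ===== VERDICT (by name: the statement is the Claim_ definition above) =====
theorem slice_project_py_spec : Claim_equal_slice_project_py := by
  intro description _
  unfold Spec_slice_project_py slice_project_py slice_project_py_alt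
  have h2 := (pvMain (PySem.Str.splitlines description)).2 []
  simp only [List.nil_append] at h2
  simp only [h2]
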